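-- pv_equiv track=rewrite | github.com/0l1ve1r4/GAFS-HC | src/preprocessing.py | remove_not_used_classes
-- ===== SOURCE A (Python) =====
-- def remove_not_used_classes(objects: list, filtered_attributes: list) -> list:
--     """Change objects classes based on filtered_attributes list."""
--
--     result_vec = []
--
--     for att_class in filtered_attributes:
--         for i in range(len(objects)):
--             if objects[i] is None:
--                 continue
--
--             if str(objects[i][-1]).startswith(att_class):
--                 objects[i][-1] = att_class
--                 result_vec.append((objects[i], i))
--                 objects[i] = None
--
--     result_vec = sorted(result_vec, key=lambda x: x[1])
--
--     return [x[0] for x in result_vec]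
-- ===== SOURCE B (Python) =====
-- def remove_not_used_classes(objects: list, filtered_attributes: list) -> list:
--     """Single pass over objects in index order: each object takes the first
--     matching class prefix; no index bookkeeping and no final sort needed."""
--     result = []
--     for obj in objects:
--         for att_class in filtered_attributes:
--             if str(obj[-1]).startswith(att_class):
--                 result.append(obj[:-1] + [att_class])
--                 break
--     return result
-- ===== Notes on version B (the rewrite author's own statement) =====
-- stated objective: simpler
-- what changed: Loop order is inverted: one pass over objects in index order taking the first matching class prefix per object (with break), which removes the None-marking of matched objects, the (obj,index) tuple bookkeeping and the final sort that A needs; B does not mutate its arguments (return values are identical).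
import Mathlib
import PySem

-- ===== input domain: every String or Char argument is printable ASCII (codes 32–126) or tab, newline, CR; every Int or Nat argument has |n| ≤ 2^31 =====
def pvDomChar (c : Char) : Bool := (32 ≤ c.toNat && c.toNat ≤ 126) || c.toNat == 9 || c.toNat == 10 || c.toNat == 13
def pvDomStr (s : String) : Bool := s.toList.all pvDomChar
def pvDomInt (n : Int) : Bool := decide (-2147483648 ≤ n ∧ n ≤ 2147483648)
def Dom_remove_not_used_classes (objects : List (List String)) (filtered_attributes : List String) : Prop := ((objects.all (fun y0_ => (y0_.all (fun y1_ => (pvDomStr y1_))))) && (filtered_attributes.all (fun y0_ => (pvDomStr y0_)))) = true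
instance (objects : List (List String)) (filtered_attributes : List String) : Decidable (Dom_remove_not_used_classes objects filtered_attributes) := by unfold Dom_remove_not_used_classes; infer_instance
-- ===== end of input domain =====

-- B inverts A's loop nesting: one pass over objects taking each object's first matching
-- class prefix, so the None-marking, the (object,index) pairs and the final sort disappear
-- (objective: simpler). A mutates `objects` in place (relabels matched rows, then sets them
-- to None) and B does not: the equivalence proved here is about the RETURN value only.

-- ===== PORT A =====
-- str(obj[-1]).startswith(att_class): the test both Pythons contain textually
def pvMatch (o : List String) (p : String) : Bool :=
  (PySem.List.pyGet? o (-1)).any (fun last => PySem.Str.startswith last p)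

-- A's inner `for i in range(len(objects))`: walks the mutated objects state in index order
-- carrying the running index i; returns the updated state and the pairs appended to
-- result_vec. `PySem.List.pyGet? o (-1) = none` is where Python raises IndexError (outside Pre_).
def pvInnerA (c : String) (i : Int) :
    List (Option (List String)) → List (Option (List String)) × List (List String × Int)
  | [] => ([], [])
  | oo :: rest =>
    match oo with
    | none => let (r, e) := pvInnerA c (i + 1) rest; (none :: r, e)
    | some o =>
      match PySem.List.pyGet? o (-1) with
      | none => let (r, e) := pvInnerA c (i + 1) rest; (some o :: r, e)
      | some last =>
        if PySem.Str.startswith last c then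
          let (r, e) := pvInnerA c (i + 1) rest
          (none :: r, (o.dropLast ++ [c], i) :: e)
        else
          let (r, e) := pvInnerA c (i + 1) rest; (some o :: r, e)
def remove_not_used_classes (objects : List (List String)) (filtered_attributes : List String) : List (List String) :=
  let st := filtered_attributes.foldl
    (fun (st : List (Option (List String)) × List (List String × Int)) c =>
      ((pvInnerA c 0 st.1).1, st.2 ++ (pvInnerA c 0 st.1).2))
    (objects.map some, ([] : List (List String × Int)))
  (PySem.List.sorted st.2 (fun x => x.2) false).map (fun x => x.1)


-- ===== PORT B =====
def remove_not_used_classes_alt (objects : List (List String)) (filtered_attributes : List String) : List (List String) :=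
  objects.foldl
    (fun res o =>
      match filtered_attributes.find? (fun p => pvMatch o p) with
      | some p => res ++ [o.dropLast ++ [p]]
      | none => res)
    []


-- ===== PRECONDITION & SPEC =====
-- Pre_ excludes exactly the inputs where Python A raises IndexError: an empty inner list
-- while there is at least one class to try (objects[i][-1] on an empty list; B raises there too).
def Pre_remove_not_used_classes (objects : List (List String)) (filtered_attributes : List String) : Prop :=
  filtered_attributes ≠ [] → ∀ o ∈ objects, o ≠ []
instance (objects : List (List String)) (filtered_attributes : List String) : Decidable (Pre_remove_not_used_classes objects filtered_attributes) := by unfold Pre_remove_not_used_classes; infer_instance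

def pvWitness_remove_not_used_classes : List (List String) × List String :=
  ([["x", "cat1a"], ["y", "dog2"]], ["cat", "dog"])

def Spec_remove_not_used_classes (objects : List (List String)) (filtered_attributes : List String) (out : List (List String)) : Prop := out = remove_not_used_classes_alt objects filtered_attributes
instance (objects : List (List String)) (filtered_attributes : List String) (out : List (List String)) : Decidable (Spec_remove_not_used_classes objects filtered_attributes out) := by unfold Spec_remove_not_used_classes; infer_instance

-- ===== CLAIM (what is proved, stated in full; the proofs are below) =====
def Claim_equal_remove_not_used_classes : Prop := ∀ (objects : List (List String)) (filtered_attributes : List String), Dom_remove_not_used_classes objects filtered_attributes → Pre_remove_not_used_classes objects filtered_attributes → Spec_remove_not_used_classes objects filtered_attributes (remove_not_used_classes objects filtered_attributes)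

-- ===== LEMMAS AND PROOFS =====
def pvUpd (c : String) (oo : Option (List String)) : Option (List String) :=
  oo.bind (fun o => if pvMatch o c then none else some o)
theorem pvInnerA_fst (c : String) (i : Int) (objs : List (Option (List String))) :
    (pvInnerA c i objs).1 = objs.map (pvUpd c) := by
  induction objs generalizing i with
  | nil => simp [pvInnerA]
  | cons oo rest ih =>
    cases oo with
    | none => simp [pvInnerA, pvUpd, ih]
    | some o =>
      cases h : PySem.List.pyGet? o (-1) with
      | none => simp [pvInnerA, h, pvUpd, pvMatch, ih]
      | some last =>
        simp [pvInnerA, h, pvUpd, pvMatch, ih]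
        split <;> simp
theorem pvInnerA_snd (c : String) (i : Int) (objs : List (Option (List String))) :
    (pvInnerA c i objs).2 =
      (PySem.List.enumerate objs i).filterMap
        (fun p => p.2.bind (fun o =>
          if pvMatch o c then some (o.dropLast ++ [c], p.1) else none)) := by
  induction objs generalizing i with
  | nil => simp [pvInnerA, PySem.List.enumerate_nil]
  | cons oo rest ih =>
    cases oo with
    | none => simp [pvInnerA, PySem.List.enumerate_cons, ih]
    | some o =>
      cases h : PySem.List.pyGet? o (-1) with
      | none => simp [pvInnerA, h, PySem.List.enumerate_cons, pvMatch, ih]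
      | some last =>
        have hm : pvMatch o c = PySem.Str.startswith last c := by
          simp [pvMatch, h]
        rw [PySem.List.enumerate_cons, List.filterMap_cons]
        by_cases hs : PySem.Str.startswith last c = true
        · simp only [pvInnerA, h, if_pos hs, hm, Option.bind_some]
          rw [ih]
        · simp only [pvInnerA, h, if_neg hs, hm, Option.bind_some]
          exact ih (i + 1)

def pvMask (seen : List String) (o : List String) : Option (List String) :=
  if seen.any (pvMatch o) then none else some o

def pvSel (seen cs : List String) (p : Int × List String) : Option (List String × Int) :=
  if seen.any (pvMatch p.2) then none
  else (cs.find? (fun c => pvMatch p.2 c)).map (fun c => (p.2.dropLast ++ [c], p.1))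

theorem pvUpd_mask (c : String) (seen : List String) (o : List String) :
    pvUpd c (pvMask seen o) = pvMask (seen ++ [c]) o := by
  by_cases hA : seen.any (pvMatch o) = true
  · simp [pvMask, pvUpd, hA]
  · by_cases hc : pvMatch o c = true <;> simp [pvMask, pvUpd, hA, hc]

theorem pvPerm_filterMap_append {α β : Type} (f g : α → Option β)
    (h : ∀ x, f x = none ∨ g x = none) (xs : List α) :
    (xs.filterMap f ++ xs.filterMap g).Perm
      (xs.filterMap (fun x => (f x).or (g x))) := by
  induction xs with
  | nil => simp
  | cons x xs ih =>
    rcases h x with hf | hg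
    · cases hg : g x with
      | none => simp [hf, hg]; exact ih
      | some b =>
        simp only [List.filterMap_cons, hf, hg, Option.or]
        exact List.Perm.trans List.perm_middle (List.Perm.cons b ih)
    · cases hf : f x with
      | none => simp [hf, hg]; exact ih
      | some a =>
        simp only [List.filterMap_cons, hf, hg, Option.or]
        exact List.Perm.cons a ih

def pvEmits (objects : List (List String)) : List String → List String → List (List String × Int)
  | _, [] => []
  | seen, c :: cs =>
      (pvInnerA c 0 (objects.map (pvMask seen))).2 ++ pvEmits objects (seen ++ [c]) cs

theorem pvOuter_spec (objects : List (List String)) (cs : List String) :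
    ∀ (seen : List String) (res : List (List String × Int)),
      cs.foldl
        (fun (st : List (Option (List String)) × List (List String × Int)) c =>
          ((pvInnerA c 0 st.1).1, st.2 ++ (pvInnerA c 0 st.1).2))
        (objects.map (pvMask seen), res)
      = (objects.map (pvMask (seen ++ cs)), res ++ pvEmits objects seen cs) := by
  induction cs with
  | nil => intro seen res; simp [pvEmits]
  | cons c cs ih =>
    intro seen res
    have h1 : (pvInnerA c 0 (objects.map (pvMask seen))).1
        = objects.map (pvMask (seen ++ [c])) := by
      rw [pvInnerA_fst, List.map_map]
      exact List.map_congr_left (fun o _ => pvUpd_mask c seen o)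
    simp only [List.foldl_cons, h1]
    rw [ih (seen ++ [c]) (res ++ (pvInnerA c 0 (objects.map (pvMask seen))).2)]
    simp [pvEmits, List.append_assoc]

theorem pvEnum_map {α β : Type} (f : α → β) (l : List α) :
    ∀ s : Int, PySem.List.enumerate (l.map f) s
      = (PySem.List.enumerate l s).map (fun p => (p.1, f p.2)) := by
  induction l with
  | nil => intro s; simp [PySem.List.enumerate_nil]
  | cons x xs ih => intro s; simp [PySem.List.enumerate_cons, ih]

theorem pvSel_step (seen : List String) (c : String) (cs : List String)
    (p : Int × List String) :
    ((pvMask seen p.2).bind (fun o =>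
        if pvMatch o c then some (o.dropLast ++ [c], p.1) else none)).or
      (pvSel (seen ++ [c]) cs p) = pvSel seen (c :: cs) p := by
  by_cases hA : seen.any (pvMatch p.2) = true
  · simp [pvMask, pvSel, hA]
  · by_cases hc : pvMatch p.2 c = true
    · simp [pvMask, pvSel, hA, hc, List.find?_cons_of_pos]
    · simp [pvMask, pvSel, hA, hc, List.find?_cons_of_neg]

theorem pvEmits_perm (objects : List (List String)) (cs : List String) :
    ∀ seen, (pvEmits objects seen cs).Perm
      ((PySem.List.enumerate objects 0).filterMap (pvSel seen cs)) := by
  induction cs with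
  | nil =>
    intro seen
    simp [pvEmits, pvSel]
  | cons c cs ih =>
    intro seen
    rw [pvEmits, pvInnerA_snd, pvEnum_map, List.filterMap_map]
    refine List.Perm.trans (List.Perm.append_left _ (ih (seen ++ [c]))) ?_
    have hd : ∀ p : Int × List String,
        ((fun p : Int × List String => (pvMask seen p.2).bind (fun o =>
          if pvMatch o c then some (o.dropLast ++ [c], p.1) else none)) p = none)
        ∨ pvSel (seen ++ [c]) cs p = none := by
      intro p
      by_cases hA : seen.any (pvMatch p.2) = true
      · left; simp [pvMask, hA]
      · by_cases hc : pvMatch p.2 c = true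
        · right; simp [pvSel, hc]
        · left; simp [pvMask, hA, hc]
    refine List.Perm.trans
      (pvPerm_filterMap_append _ _ hd (PySem.List.enumerate objects 0)) ?_
    rw [List.filterMap_congr (fun p _ => pvSel_step seen c cs p)]

theorem pvSel_snd (seen cs : List String) (p : Int × List String)
    (q : List String × Int) (h : pvSel seen cs p = some q) : q.2 = p.1 := by
  unfold pvSel at h
  split at h
  · exact absurd h (by simp)
  · rcases Option.map_eq_some_iff.mp h with ⟨c, _, rfl⟩
    rfl

theorem pvLp_pairwise (objects : List (List String)) (fa seen : List String) :
    ((PySem.List.enumerate objects 0).filterMap (pvSel seen fa)).Pairwise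
      (fun a b => a.2 < b.2) := by
  rw [List.pairwise_filterMap]
  refine (PySem.List.pairwise_lt_enumerate objects 0).imp ?_
  intro a b hab x hx y hy
  rw [pvSel_snd seen fa a x (by simpa using hx), pvSel_snd seen fa b y (by simpa using hy)]
  exact hab

theorem pvB_filterMap (objects : List (List String)) (fa : List String) :
    remove_not_used_classes_alt objects fa =
      objects.filterMap (fun o =>
        (fa.find? (fun p => pvMatch o p)).map (fun p => o.dropLast ++ [p])) := by
  have key : ∀ (objs : List (List String)) (acc : List (List String)),
      objs.foldl
        (fun res o =>
          match fa.find? (fun p => pvMatch o p) with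
          | some p => res ++ [o.dropLast ++ [p]]
          | none => res) acc
      = acc ++ objs.filterMap (fun o =>
          (fa.find? (fun p => pvMatch o p)).map (fun p => o.dropLast ++ [p])) := by
    intro objs
    induction objs with
    | nil => intro acc; simp
    | cons o objs ih =>
      intro acc
      cases h : fa.find? (fun p => pvMatch o p) with
      | none => simp [h, ih]
      | some p => simp [h, ih]
  simpa using key objects []

theorem pvMapFst_Lp (objects : List (List String)) (fa : List String) :
    ∀ s : Int, ((PySem.List.enumerate objects s).filterMap (pvSel [] fa)).map (fun x => x.1) =
      objects.filterMap (fun o =>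
        (fa.find? (fun p => pvMatch o p)).map (fun p => o.dropLast ++ [p])) := by
  induction objects with
  | nil => intro s; simp [PySem.List.enumerate_nil]
  | cons o objs ih =>
    intro s
    rw [PySem.List.enumerate_cons]
    have hsel : pvSel [] fa (s, o)
        = (fa.find? (fun p => pvMatch o p)).map (fun p => (o.dropLast ++ [p], s)) := by
      simp [pvSel]
    cases h : fa.find? (fun p => pvMatch o p) with
    | none => simp [hsel, h, ih]
    | some p => simp [hsel, h, ih]

theorem main_spec (objects : List (List String)) (fa : List String) :
    remove_not_used_classes objects fa = remove_not_used_classes_alt objects fa := by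
  unfold remove_not_used_classes
  have hstart : objects.map some = objects.map (pvMask []) := by
    exact List.map_congr_left (fun o _ => by simp [pvMask])
  rw [hstart, pvOuter_spec objects fa [] []]
  simp only [List.nil_append]
  rw [PySem.List.sorted_eq_of_perm_of_pairwise_lt (pvEmits objects [] fa)
        ((PySem.List.enumerate objects 0).filterMap (pvSel [] fa)) (fun x => x.2)
        ((pvEmits_perm objects fa []).symm) (pvLp_pairwise objects fa [])]
  rw [pvMapFst_Lp objects fa 0, pvB_filterMap]

-- ===== VERDICT (by name: the statement is the Claim_ definition above) =====
theorem remove_not_used_classes_spec : Claim_equal_remove_not_used_classes := by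
  intro objects fa _ _
  exact main_spec objects fa
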